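-- pv_equiv track=rewrite | github.com/allenai/PathNet | scripts/prepro/wikihop_prep_data_with_lemma.py | adjust_word_idxs
-- ===== SOURCE A (Python) =====
-- def adjust_word_idxs(toks, widxs):
--     split_toks = ' '.join(toks).split()
--     if len(toks) == len(split_toks):
--         return widxs
--     else:
--         mod_widxs = [widx - (len(toks[:widx]) - len(' '.join(toks[:widx]).split()))
--                      for widx in widxs]
--         return mod_widxs
-- ===== SOURCE B (Python) =====
-- def adjust_word_idxs(toks, widxs):
--     n = len(toks)
--     # prefix[i] = number of whitespace-split words in the first i tokens
--     prefix = [0]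
--     total = 0
--     for t in toks:
--         total += len(t.split())
--         prefix.append(total)
--     if prefix[n] == n:
--         return widxs
--
--     def adj(widx):
--         # normalise widx the way the slice toks[:widx] would
--         k = widx + n if widx < 0 else widx
--         if k < 0:
--             k = 0
--         elif k > n:
--             k = n
--         return widx - (k - prefix[k])
--
--     return [adj(w) for w in widxs]
-- ===== Notes on version B (the rewrite author's own statement) =====
-- stated objective: alternative
-- what changed: B builds a prefix-sum array of per-token whitespace word counts in a single pass and answers each widx with a clamp-and-lookup into it, instead of A re-joining and re-splitting the whole token prefix toks[:widx] for every widx.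
import Mathlib
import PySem

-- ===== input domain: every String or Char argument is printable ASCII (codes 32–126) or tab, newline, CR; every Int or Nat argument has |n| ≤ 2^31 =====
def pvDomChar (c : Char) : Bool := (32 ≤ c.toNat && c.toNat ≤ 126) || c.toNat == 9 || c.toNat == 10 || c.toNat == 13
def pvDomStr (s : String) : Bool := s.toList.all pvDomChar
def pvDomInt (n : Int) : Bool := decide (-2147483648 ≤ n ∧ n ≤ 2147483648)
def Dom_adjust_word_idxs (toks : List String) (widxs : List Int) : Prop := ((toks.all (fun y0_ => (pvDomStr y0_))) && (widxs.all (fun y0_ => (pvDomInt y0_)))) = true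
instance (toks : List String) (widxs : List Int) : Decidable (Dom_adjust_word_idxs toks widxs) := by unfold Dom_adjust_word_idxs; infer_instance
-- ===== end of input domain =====

-- B replaces A's per-index re-join/re-split of the whole token prefix by one prefix-sum
-- pass over per-token word counts with a clamp-and-lookup per index (objective: alternative).

-- ===== PORT A =====
def adjust_word_idxs (toks : List String) (widxs : List Int) : List Int :=
  let split_toks := PySem.Str.split₀ (PySem.Str.join " " toks)
  if toks.length = split_toks.length then widxs
  else
    widxs.map (fun widx =>
      let pre := PySem.List.slice toks none (some widx)
      widx - ((pre.length : Int) - ((PySem.Str.split₀ (PySem.Str.join " " pre)).length : Int)))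

-- ===== PORT B =====
-- Source B's inner 'adj' closure (n, prefix passed explicitly)
def pvAdj (n : Nat) (prefixSums : List Int) (widx : Int) : Int :=
  let k0 : Int := if widx < 0 then widx + n else widx
  let k : Nat := if k0 < 0 then 0 else if k0 > (n : Int) then n else k0.toNat
  widx - ((k : Int) - prefixSums.getD k 0)

def adjust_word_idxs_alt (toks : List String) (widxs : List Int) : List Int :=
  let n := toks.length
  let st := toks.foldl (fun (p : List Int × Int) t =>
      let total := p.2 + ((PySem.Str.split₀ t).length : Int)
      (p.1 ++ [total], total)) ([0], 0)
  let prefixSums := st.1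
  if prefixSums.getD n 0 = (n : Int) then widxs
  else widxs.map (pvAdj n prefixSums)

-- ===== PRECONDITION & SPEC =====
def Spec_adjust_word_idxs (toks : List String) (widxs : List Int) (out : List Int) : Prop := out = adjust_word_idxs_alt toks widxs
instance (toks : List String) (widxs : List Int) (out : List Int) : Decidable (Spec_adjust_word_idxs toks widxs out) := by unfold Spec_adjust_word_idxs; infer_instance

-- ===== CLAIM (what is proved, stated in full; the proofs are below) =====
def Claim_equal_adjust_word_idxs : Prop := ∀ (toks : List String) (widxs : List Int), Dom_adjust_word_idxs toks widxs → Spec_adjust_word_idxs toks widxs (adjust_word_idxs toks widxs)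

-- ===== LEMMAS AND PROOFS =====

-- word count of one token, as an Int
def pvWcI (t : String) : Int := ((PySem.Str.split₀ t).length : Int)

-- the partial sums appended by B's fold after the initial 0
def pvPartials (l : List String) (t : Int) : List Int :=
  match l with
  | [] => []
  | x :: xs => (t + pvWcI x) :: pvPartials xs (t + pvWcI x)

theorem pv_go_acc (s : List Char) : ∀ (cur : List Char) (acc : List (List Char)),
    PySem.Chars.split₀.go s cur acc = acc.reverse ++ PySem.Chars.split₀.go s cur [] := by
  induction s with
  | nil =>
    intro cur acc
    simp only [PySem.Chars.split₀.go]
    split_ifs <;> simp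
  | cons c rest ih =>
    intro cur acc
    simp only [PySem.Chars.split₀.go]
    split_ifs with h1 h2
    · rw [ih [] acc]
    · rw [ih [] (cur.reverse :: acc), ih [] [cur.reverse]]
      simp
    · rw [ih (c :: cur) acc]

theorem pv_go_space (a : List Char) : ∀ (b cur : List Char) (acc : List (List Char)),
    PySem.Chars.split₀.go (a ++ ' ' :: b) cur acc =
      PySem.Chars.split₀.go a cur acc ++ PySem.Chars.split₀.go b [] [] := by
  induction a with
  | nil =>
    intro b cur acc
    simp only [List.nil_append, PySem.Chars.split₀.go,
      show PySem.Chars.isspace ' ' = true from by decide, if_true]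
    by_cases h : cur.isEmpty = true
    · rw [if_pos h, if_pos h]
      exact pv_go_acc b [] acc
    · rw [if_neg h, if_neg h, pv_go_acc b [] (cur.reverse :: acc)]
  | cons c rest ih =>
    intro b cur acc
    simp only [List.cons_append, PySem.Chars.split₀.go]
    split_ifs with h1 h2 <;> rw [ih]

theorem pv_split₀_append_space (a b : List Char) :
    PySem.Chars.split₀ (a ++ ' ' :: b) = PySem.Chars.split₀ a ++ PySem.Chars.split₀ b := by
  simp only [PySem.Chars.split₀]
  exact pv_go_space a b [] []

theorem pv_split₀_join (parts : List (List Char)) :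
    PySem.Chars.split₀ (PySem.Chars.join [' '] parts) = (parts.map PySem.Chars.split₀).flatten := by
  induction parts with
  | nil => rfl
  | cons x xs ih =>
    cases xs with
    | nil => simp [PySem.Chars.join, List.intercalate]
    | cons y ys =>
      have hjoin : PySem.Chars.join [' '] (x :: y :: ys) = x ++ ' ' :: PySem.Chars.join [' '] (y :: ys) := by
        simp [PySem.Chars.join, List.intercalate, List.intersperse]
      rw [hjoin, pv_split₀_append_space, ih]
      simp

theorem pv_words_join (l : List String) :
    ((PySem.Str.split₀ (PySem.Str.join " " l)).length : Int) = (l.map pvWcI).sum := by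
  have h1 : (PySem.Str.join " " l).toList = PySem.Chars.join [' '] (l.map String.toList) := by
    simp [PySem.Str.join, String.toList_ofList]
  simp only [PySem.Str.split₀, List.length_map, h1, pv_split₀_join]
  have h2 : ∀ (ps : List String),
      (((ps.map String.toList).map PySem.Chars.split₀).flatten.length : Int) = (ps.map pvWcI).sum := by
    intro ps
    induction ps with
    | nil => simp
    | cons x xs ih =>
      simp only [List.map_cons, List.flatten_cons, List.length_append, List.sum_cons]
      rw [← ih]
      simp only [pvWcI, PySem.Str.split₀, List.length_map]
      push_cast
      ring
  exact h2 l

theorem pv_fold_eq (l : List String) : ∀ (p : List Int) (t : Int),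
    (l.foldl (fun (p : List Int × Int) t =>
      let total := p.2 + ((PySem.Str.split₀ t).length : Int)
      (p.1 ++ [total], total)) (p, t)).1 = p ++ pvPartials l t := by
  induction l with
  | nil => intro p t; simp [pvPartials]
  | cons x xs ih =>
    intro p t
    simp only [List.foldl_cons]
    rw [ih]
    simp [pvPartials, pvWcI]

theorem pv_getD_partials (l : List String) : ∀ (k : Nat) (t : Int), k ≤ l.length →
    (t :: pvPartials l t).getD k 0 = t + ((l.take k).map pvWcI).sum := by
  induction l with
  | nil =>
    intro k t hk
    have : k = 0 := Nat.le_zero.mp hk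
    subst this; simp
  | cons x xs ih =>
    intro k t hk
    cases k with
    | zero => simp
    | succ j =>
      have hp : pvPartials (x :: xs) t = (t + pvWcI x) :: pvPartials xs (t + pvWcI x) := rfl
      rw [hp]
      simp only [List.getD_cons_succ, List.take_succ_cons, List.map_cons, List.sum_cons]
      rw [ih j (t + pvWcI x) (by simpa using hk)]
      ring

theorem pv_slice_take (xs : List String) (i : Int) :
    PySem.List.slice xs none (some i) = xs.take (PySem.List.clampIdx xs.length i) := by
  simp [PySem.List.slice]

theorem pv_clampIdx_le (n : Nat) (i : Int) : PySem.List.clampIdx n i ≤ n := by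
  simp only [PySem.List.clampIdx]
  split_ifs <;> omega

theorem pv_adj_eq (toks : List String) (widx : Int) :
    pvAdj toks.length (0 :: pvPartials toks 0) widx =
      widx - (((PySem.List.slice toks none (some widx)).length : Int)
        - ((PySem.Str.split₀ (PySem.Str.join " " (PySem.List.slice toks none (some widx)))).length : Int)) := by
  have hk : (let k0 : Int := if widx < 0 then widx + toks.length else widx
             if k0 < 0 then 0 else if k0 > (toks.length : Int) then toks.length else k0.toNat)
      = PySem.List.clampIdx toks.length widx := by
    simp only [PySem.List.clampIdx]
    split_ifs <;> omega
  simp only [pvAdj]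
  rw [hk, pv_slice_take, pv_words_join,
    pv_getD_partials toks (PySem.List.clampIdx toks.length widx) 0 (pv_clampIdx_le _ _),
    List.length_take]
  have := pv_clampIdx_le toks.length widx
  have hmin : min (PySem.List.clampIdx toks.length widx) toks.length
      = PySem.List.clampIdx toks.length widx := by omega
  rw [hmin]
  ring

-- ===== VERDICT (by name: the statement is the Claim_ definition above) =====
theorem adjust_word_idxs_spec : Claim_equal_adjust_word_idxs := by
  intro toks widxs _
  unfold Spec_adjust_word_idxs adjust_word_idxs adjust_word_idxs_alt
  simp only [pv_fold_eq toks [0] 0]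
  have hpl : ([0] ++ pvPartials toks 0 : List Int) = 0 :: pvPartials toks 0 := rfl
  rw [hpl]
  have hcond : ((0 :: pvPartials toks 0 : List Int).getD toks.length 0 = (toks.length : Int))
      ↔ toks.length = (PySem.Str.split₀ (PySem.Str.join " " toks)).length := by
    rw [pv_getD_partials toks toks.length 0 le_rfl, List.take_length]
    have hw := pv_words_join toks
    omega
  by_cases hc : toks.length = (PySem.Str.split₀ (PySem.Str.join " " toks)).length
  · rw [if_pos hc, if_pos (hcond.mpr hc)]
  · rw [if_neg hc, if_neg (fun h => hc (hcond.mp h))]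
    refine List.map_congr_left (fun widx _ => ?_)
    exact (pv_adj_eq toks widx).symm
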